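-- pv_equiv track=rewrite | github.com/ammar-safi/resume-parser | resume_parser_service.py | _parse_experience_improved
-- ===== SOURCE A (Python) =====
-- def _parse_experience_improved(experience_lines: list) -> list:
--     """Parse work experience with improved logic."""
--     experiences = []
--     current_exp = ""
--
--     for line in experience_lines:
--         if "|" in line:  # New experience entry
--             if current_exp:
--                 experiences.append(current_exp.strip())
--             current_exp = line
--         else:
--             current_exp += " " + line
--
--     if current_exp:
--         experiences.append(current_exp.strip())
--
--     return experiences
-- ===== SOURCE B (Python) =====
-- def _parse_experience_improved(experience_lines: list) -> list:
--     """Parse work experience: slice the lines into segments at pipe-line boundaries, then join each."""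
--     pipes = [i for i, line in enumerate(experience_lines) if "|" in line]
--     bounds = [0] + pipes + [len(experience_lines)]
--     segments = [experience_lines[b:e] for b, e in zip(bounds, bounds[1:])]
--     return [" ".join(seg).strip() for seg in segments if seg]
-- ===== Notes on version B (the rewrite author's own statement) =====
-- stated objective: alternative
-- what changed: Replaced the single-pass running-string accumulator with truthiness flushes by a staged index/slice pipeline: collect the indices of pipe-containing lines, form boundary pairs by zipping the bounds list with its tail, slice the input at those boundaries, and join-and-strip each non-empty segment.
import Mathlib
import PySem

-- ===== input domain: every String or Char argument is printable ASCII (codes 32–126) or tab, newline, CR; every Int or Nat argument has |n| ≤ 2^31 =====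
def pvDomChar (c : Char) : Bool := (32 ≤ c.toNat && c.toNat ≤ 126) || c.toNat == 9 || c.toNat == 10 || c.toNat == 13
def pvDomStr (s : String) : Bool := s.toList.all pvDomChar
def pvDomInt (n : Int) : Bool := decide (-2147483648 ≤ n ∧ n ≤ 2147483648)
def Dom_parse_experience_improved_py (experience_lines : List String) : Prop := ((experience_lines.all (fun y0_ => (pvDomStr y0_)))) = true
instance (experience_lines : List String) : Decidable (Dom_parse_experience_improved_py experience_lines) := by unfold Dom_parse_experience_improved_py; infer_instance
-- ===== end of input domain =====

-- B replaces A's running-string accumulator by a staged index/slice pipeline: collect pipe-line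
-- indices, zip the bounds list with its tail, slice at those boundaries, join each non-empty
-- segment (alternative decomposition, same cost).

-- ===== PORT A =====
def parse_experience_improved_py (experience_lines : List String) : List String :=
  let fin := experience_lines.foldl
    (fun (st : List String × String) line =>
      if PySem.Str.isIn "|" line then
        ((if st.2 ≠ "" then st.1 ++ [PySem.Str.strip st.2] else st.1), line)
      else (st.1, st.2 ++ " " ++ line)) ([], "")
  if fin.2 ≠ "" then fin.1 ++ [PySem.Str.strip fin.2] else fin.1

-- ===== PORT B =====
def parse_experience_improved_py_alt (experience_lines : List String) : List String :=
  let pipes := ((PySem.List.enumerate experience_lines 0).filter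
      (fun p => PySem.Str.isIn "|" p.2)).map (·.1)
  let bounds := [(0 : Int)] ++ pipes ++ [(experience_lines.length : Int)]
  let segments := (bounds.zip bounds.tail).map
      (fun be => PySem.List.slice experience_lines (some be.1) (some be.2))
  (segments.filter (fun s => !s.isEmpty)).map
      (fun s => PySem.Str.strip (PySem.Str.join " " s))

-- ===== PRECONDITION & SPEC =====
def Spec_parse_experience_improved_py (experience_lines : List String) (out : List String) : Prop := out = parse_experience_improved_py_alt experience_lines
instance (experience_lines : List String) (out : List String) : Decidable (Spec_parse_experience_improved_py experience_lines out) := by unfold Spec_parse_experience_improved_py; infer_instance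

-- ===== CLAIM (what is proved, stated in full; the proofs are below) =====
def Claim_equal_parse_experience_improved_py : Prop := ∀ (experience_lines : List String), Dom_parse_experience_improved_py experience_lines → Spec_parse_experience_improved_py experience_lines (parse_experience_improved_py experience_lines)

-- ===== LEMMAS AND PROOFS =====

-- the common reference point: a list of line-groups and what gets emitted for it
def pvEmit (gs : List (List String)) : List String :=
  (gs.filter (fun g => !g.isEmpty)).map (fun g => PySem.Str.strip (PySem.Str.join " " g))

-- the grouping fold both sides are reduced to
def pvStep (st : List (List String) × List String) (line : String) : List (List String) × List String :=
  if PySem.Str.isIn "|" line then (st.1 ++ [st.2], [line]) else (st.1, st.2 ++ [line])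

def pvGAll (xs : List String) : List (List String) :=
  (xs.foldl pvStep ([], [])).1 ++ [(xs.foldl pvStep ([], [])).2]

def pvConsHead (g : List String) : List (List String) → List (List String)
  | [] => [g]
  | h :: r => (g ++ h) :: r

-- Nat-level mirror of B's pipeline
def pvPipesN : List String → List Nat
  | [] => []
  | y :: t => if PySem.Str.isIn "|" y then 0 :: (pvPipesN t).map (· + 1) else (pvPipesN t).map (· + 1)

def pvSeg (xs : List String) (p : Nat × Nat) : List String := (xs.drop p.1).take (p.2 - p.1)

def pvZipB (l : List Nat) : List (Nat × Nat) := l.zip l.tail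

def pvSegsN (xs : List String) : List (List String) :=
  (pvZipB (0 :: (pvPipesN xs ++ [xs.length]))).map (pvSeg xs)

-- ===== A-side: A's running string renders the current group =====
def pvRend (g : List String) (cur : String) : Prop :=
  (cur = "" ∧ g = []) ∨
  (cur ≠ "" ∧ g ≠ [] ∧
    (cur.toList = PySem.Chars.join [' '] (g.map String.toList) ∨
     cur.toList = ' ' :: PySem.Chars.join [' '] (g.map String.toList)))

lemma pvStrip_space_cons (cs : List Char) :
    PySem.Chars.strip (' ' :: cs) = PySem.Chars.strip cs := by
  simp [PySem.Chars.strip, PySem.Chars.lstrip, List.dropWhile, PySem.Chars.isspace]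

lemma pvPipe_ne_empty (l : String) (h : PySem.Str.isIn "|" l = true) : l ≠ "" := by
  intro he; subst he
  simp only [PySem.Str.isIn_eq] at h
  rw [PySem.Chars.isIn_iff_infix] at h; simp at h

lemma pvJoin_append (g : List String) (l : String) (h : g ≠ []) :
    PySem.Chars.join [' '] ((g ++ [l]).map String.toList)
      = PySem.Chars.join [' '] (g.map String.toList) ++ ' ' :: l.toList := by
  induction g with
  | nil => simp at h
  | cons a t ih =>
    cases t with
    | nil => simp [PySem.Chars.join_cons_cons, PySem.Chars.join_singleton]
    | cons b u =>
      simp only [List.cons_append, List.map_cons, PySem.Chars.join_cons_cons] at *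
      rw [ih (by simp)]; simp

lemma pvEmit_append (gs gs' : List (List String)) :
    pvEmit (gs ++ gs') = pvEmit gs ++ pvEmit gs' := by
  simp [pvEmit, List.filter_append]

lemma pvFlush (g : List String) (cur : String) (hr : pvRend g cur) (exps : List String) :
    (if cur ≠ "" then exps ++ [PySem.Str.strip cur] else exps) = exps ++ pvEmit [g] := by
  rcases hr with ⟨hc, hg⟩ | ⟨hc, hg, hj⟩
  · subst hc; subst hg; simp [pvEmit]
  · have hstrip : PySem.Str.strip cur = PySem.Str.strip (PySem.Str.join " " g) := by
      apply String.toList_inj.mp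
      simp only [PySem.Str.toList_strip, PySem.Str.toList_join]
      rcases hj with hj | hj <;> rw [hj]
      · rfl
      · rw [pvStrip_space_cons]; rfl
    have hgne : (!g.isEmpty) = true := by
      cases g with | nil => exact absurd rfl hg | cons a t => rfl
    simp [hc, pvEmit, hgne, hstrip]

-- A's loop invariant: its running state renders the grouping fold's state
lemma pvLoop (ls : List String) (exps : List String) (cur : String)
    (gs : List (List String)) (g : List String)
    (hr : pvRend g cur) (he : exps = pvEmit gs) :
    (if (ls.foldl (fun (st : List String × String) line =>
          if PySem.Str.isIn "|" line then
            ((if st.2 ≠ "" then st.1 ++ [PySem.Str.strip st.2] else st.1), line)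
          else (st.1, st.2 ++ " " ++ line)) (exps, cur)).2 ≠ "" then
        (ls.foldl (fun (st : List String × String) line =>
          if PySem.Str.isIn "|" line then
            ((if st.2 ≠ "" then st.1 ++ [PySem.Str.strip st.2] else st.1), line)
          else (st.1, st.2 ++ " " ++ line)) (exps, cur)).1
          ++ [PySem.Str.strip ((ls.foldl (fun (st : List String × String) line =>
          if PySem.Str.isIn "|" line then
            ((if st.2 ≠ "" then st.1 ++ [PySem.Str.strip st.2] else st.1), line)
          else (st.1, st.2 ++ " " ++ line)) (exps, cur)).2)]
      else (ls.foldl (fun (st : List String × String) line =>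
          if PySem.Str.isIn "|" line then
            ((if st.2 ≠ "" then st.1 ++ [PySem.Str.strip st.2] else st.1), line)
          else (st.1, st.2 ++ " " ++ line)) (exps, cur)).1)
    = pvEmit ((ls.foldl pvStep (gs, g)).1 ++ [(ls.foldl pvStep (gs, g)).2]) := by
  induction ls generalizing exps cur gs g with
  | nil =>
    simp only [List.foldl_nil]
    rw [pvEmit_append, ← he, pvFlush g cur hr exps]
  | cons l ls ih =>
    simp only [List.foldl_cons, pvStep]
    by_cases hp : PySem.Str.isIn "|" l = true
    · simp only [hp, if_true]
      apply ih
      · exact Or.inr ⟨pvPipe_ne_empty l hp, by simp,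
          Or.inl (by simp [PySem.Chars.join_singleton])⟩
      · rw [pvFlush g cur hr exps, he, ← pvEmit_append]
    · simp only [hp]
      refine ih _ _ _ _ ?_ he
      have hne : cur ++ " " ++ l ≠ "" := by
        intro hc
        have := congrArg String.toList hc
        simp [String.toList_append] at this
      rcases hr with ⟨hc, hg⟩ | ⟨hc, hg, hj⟩
      · subst hc; subst hg
        refine Or.inr ⟨hne, by simp, Or.inr ?_⟩
        simp [String.toList_append, PySem.Chars.join_singleton]
      · refine Or.inr ⟨hne, by simp [hg], ?_⟩
        rcases hj with hj | hj
        · exact Or.inl (by rw [pvJoin_append g l hg]; simp [String.toList_append, hj])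
        · exact Or.inr (by rw [pvJoin_append g l hg]; simp [String.toList_append, hj])

-- ===== grouping-fold recurrence =====
lemma pvConsHead_consHead (g h : List String) (L : List (List String)) :
    pvConsHead g (pvConsHead h L) = pvConsHead (g ++ h) L := by
  cases L <;> simp [pvConsHead]

lemma pvAllFrom (t : List String) (gs : List (List String)) (g : List String) :
    (t.foldl pvStep (gs, g)).1 ++ [(t.foldl pvStep (gs, g)).2] = gs ++ pvConsHead g (pvGAll t) := by
  induction t generalizing gs g with
  | nil => simp [pvGAll, pvConsHead]
  | cons y t ih =>
    simp only [List.foldl_cons, pvStep]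
    by_cases hp : PySem.Str.isIn "|" y = true
    · rw [if_pos hp, ih (gs ++ [g]) [y]]
      have h2 : pvGAll (y :: t) = [] :: pvConsHead [y] (pvGAll t) := by
        unfold pvGAll
        simp only [List.foldl_cons, pvStep]
        rw [if_pos hp]
        simp only [List.nil_append]
        rw [ih [[]] [y]]
        rfl
      rw [h2]
      simp [pvConsHead]
    · rw [if_neg hp, ih gs (g ++ [y])]
      have h2 : pvGAll (y :: t) = pvConsHead [y] (pvGAll t) := by
        unfold pvGAll
        simp only [List.foldl_cons, pvStep]
        rw [if_neg hp]
        simp only [List.nil_append]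
        rw [ih [] [y]]
        rfl
      rw [h2, pvConsHead_consHead]

lemma pvGAll_cons (y : String) (t : List String) :
    pvGAll (y :: t)
      = if PySem.Str.isIn "|" y then [] :: pvConsHead [y] (pvGAll t)
        else pvConsHead [y] (pvGAll t) := by
  by_cases hp : PySem.Str.isIn "|" y = true
  · rw [if_pos hp]
    unfold pvGAll
    simp only [List.foldl_cons, pvStep]
    rw [if_pos hp]
    simp only [List.nil_append]
    rw [pvAllFrom t [[]] [y]]
    rfl
  · rw [if_neg hp]
    unfold pvGAll
    simp only [List.foldl_cons, pvStep]
    rw [if_neg hp]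
    simp only [List.nil_append]
    rw [pvAllFrom t [] [y]]
    rfl

-- ===== slice-pipeline recurrence =====
lemma pvSeg_shift (y : String) (t : List String) (a b : Nat) :
    pvSeg (y :: t) (a + 1, b + 1) = pvSeg t (a, b) := by
  simp [pvSeg]

lemma pvZipB_map_succ (l : List Nat) :
    pvZipB (l.map (· + 1)) = (pvZipB l).map (fun p => (p.1 + 1, p.2 + 1)) := by
  unfold pvZipB
  rw [← List.map_tail, List.zip_map]
  rfl

lemma pvSegs_core' (y : String) (t : List String) (h : Nat) (r : List Nat) :
    (pvZipB (0 :: (h :: r).map (· + 1))).map (pvSeg (y :: t))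
      = pvConsHead [y] ((pvZipB (0 :: h :: r)).map (pvSeg t)) := by
  have hshift : (pvZipB ((h :: r).map (· + 1))).map (pvSeg (y :: t))
      = (pvZipB (h :: r)).map (pvSeg t) := by
    rw [pvZipB_map_succ, List.map_map]
    refine List.map_congr_left ?_
    intro p _
    obtain ⟨a, b⟩ := p
    exact pvSeg_shift y t a b
  have hhead : pvSeg (y :: t) (0, h + 1) = y :: pvSeg t (0, h) := by
    simp [pvSeg]
  simp only [List.map_cons, pvZipB, List.tail_cons, List.zip_cons_cons] at *
  simp only [hhead, hshift, pvConsHead, List.singleton_append]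

lemma pvSegs_core (y : String) (t : List String) (P : List Nat) :
    (pvZipB (0 :: (P.map (· + 1) ++ [t.length + 1]))).map (pvSeg (y :: t))
      = pvConsHead [y] ((pvZipB (0 :: (P ++ [t.length]))).map (pvSeg t)) := by
  have hm : P.map (· + 1) ++ [t.length + 1] = (P ++ [t.length]).map (· + 1) := by simp
  obtain ⟨h, r, hl⟩ : ∃ h r, P ++ [t.length] = h :: r :=
    List.exists_cons_of_ne_nil (by simp)
  rw [hm, hl]
  exact pvSegs_core' y t h r

lemma pvSegsN_cons (y : String) (t : List String) :
    pvSegsN (y :: t)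
      = if PySem.Str.isIn "|" y then [] :: pvConsHead [y] (pvSegsN t)
        else pvConsHead [y] (pvSegsN t) := by
  by_cases hp : PySem.Str.isIn "|" y = true
  · simp only [hp, if_true]
    unfold pvSegsN
    simp only [pvPipesN, hp, if_true, List.length_cons, List.cons_append]
    have : pvZipB (0 :: 0 :: ((pvPipesN t).map (· + 1) ++ [t.length + 1]))
        = (0, 0) :: pvZipB (0 :: ((pvPipesN t).map (· + 1) ++ [t.length + 1])) := by
      simp [pvZipB]
    rw [this]
    simp only [List.map_cons]
    rw [pvSegs_core y t (pvPipesN t)]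
    simp [pvSeg]
  · simp only [hp]
    unfold pvSegsN
    simp only [pvPipesN, hp, List.length_cons]
    exact pvSegs_core y t (pvPipesN t)

lemma pvSegsN_eq_pvGAll (xs : List String) : pvSegsN xs = pvGAll xs := by
  induction xs with
  | nil => simp [pvSegsN, pvGAll, pvZipB, pvSeg, pvPipesN]
  | cons y t ih => rw [pvSegsN_cons, pvGAll_cons, ih]

-- ===== bridging B's Int-valued pipeline to the Nat mirror =====
lemma pvPipes_cast (xs : List String) (s : Int) :
    ((PySem.List.enumerate xs s).filter (fun p => PySem.Str.isIn "|" p.2)).map (·.1)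
      = (pvPipesN xs).map (fun (n : Nat) => s + (n : Int)) := by
  induction xs generalizing s with
  | nil => simp [PySem.List.enumerate_nil, pvPipesN]
  | cons y t ih =>
    rw [PySem.List.enumerate_cons]
    simp only [List.filter_cons]
    by_cases hp : PySem.Str.isIn "|" y = true
    · rw [if_pos (by simpa using hp)]
      have h1 : pvPipesN (y :: t) = 0 :: (pvPipesN t).map (· + 1) := by
        simp only [pvPipesN]; rw [if_pos hp]
      rw [h1, List.map_cons, List.map_cons, ih (s + 1), List.map_map]
      refine congrArg₂ List.cons (by simp) ?_
      refine List.map_congr_left ?_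
      intro n _
      simp only [Function.comp_apply]
      push_cast
      ring
    · rw [if_neg (by simpa using hp)]
      have h1 : pvPipesN (y :: t) = (pvPipesN t).map (· + 1) := by
        simp only [pvPipesN]; rw [if_neg hp]
      rw [h1, ih (s + 1), List.map_map]
      refine List.map_congr_left ?_
      intro n _
      simp only [Function.comp_apply]
      push_cast
      ring

lemma pvAlt_eq (xs : List String) :
    parse_experience_improved_py_alt xs = pvEmit (pvGAll xs) := by
  have hf : (fun (n : Nat) => (0 : Int) + (n : Int)) = (fun (n : Nat) => (n : Int)) := by
    funext n; ring
  have hb : [(0 : Int)] ++ ((PySem.List.enumerate xs 0).filter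
        (fun p => PySem.Str.isIn "|" p.2)).map (·.1) ++ [(xs.length : Int)]
      = (0 :: (pvPipesN xs ++ [xs.length])).map (fun (n : Nat) => (n : Int)) := by
    rw [pvPipes_cast xs 0, hf]
    simp
  have hsegs : ((((0 :: (pvPipesN xs ++ [xs.length])).map (fun (n : Nat) => (n : Int))).zip
        (((0 :: (pvPipesN xs ++ [xs.length])).map (fun (n : Nat) => (n : Int))).tail)).map
        (fun be => PySem.List.slice xs (some be.1) (some be.2)))
      = pvSegsN xs := by
    rw [← List.map_tail, List.zip_map, List.map_map]
    unfold pvSegsN pvZipB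
    refine List.map_congr_left ?_
    intro p _
    obtain ⟨a, b⟩ := p
    simp only [Function.comp_apply, Prod.map]
    rw [PySem.List.slice_natCast]
    rfl
  unfold parse_experience_improved_py_alt
  simp only [hb, hsegs, pvSegsN_eq_pvGAll]
  rfl

-- ===== VERDICT (by name: the statement is the Claim_ definition above) =====
theorem parse_experience_improved_py_spec : Claim_equal_parse_experience_improved_py := by
  intro ls _
  unfold Spec_parse_experience_improved_py parse_experience_improved_py
  rw [pvAlt_eq]
  have := pvLoop ls [] "" [] [] (Or.inl ⟨rfl, rfl⟩) (by simp [pvEmit])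
  simpa [pvGAll] using this
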